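-- pv_equiv track=rewrite | github.com/smohapatra1/scripting | python/practice/start_again/2024/05122024/similar_strings.py | similarStrings
-- ===== SOURCE A (Python) =====
-- def extract_map(subst):
--     pairs_ = []
--     len_ = len(subst)
--     for s in range(len_-1):
--         s_pairs_ = 0b0
--         index = 0
--         for e in range(s + 1, len_):
--             if subst[s] == subst[e]:
--                 s_pairs_ += 1 << index
--             index += 1
--         pairs_.append(s_pairs_)
--     return pairs_
--
-- def extract_submap(map_, s, e):
--     pairs_ = []
--     len_ = e - s - 1
--     mask = 2 ** len_ - 1
--     for s_ in range(s, e - 1):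
--         pairs_.append( map_[s_] &  mask )
--         mask >>= 1
--     return pairs_
--
-- def similarStrings(n, queries):
--     # Write your code here
--     out = []
--     s_map = extract_map(n)
--     s_len = len(n)
--     for s, e in queries:
--         ss_map = extract_submap(s_map, s - 1, e)
--         ss_len = e - s + 1
--         sss_len = s_len
--         if ss_len > 1:
--             candidates = list(range(s_len - ss_len + 1))
--             len_ = ss_len - 1
--             mask = 2 ** len_ - 1
--             for s_ in ss_map:
--                 candidates = [
--                     st + 1 \
--                     for st in candidates \
--                     if s_map[st] & mask == s_
--                 ]
--                 mask >>= 1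
--             sss_len = len(candidates)
--         out.append(sss_len)
--     return out
-- ===== SOURCE B (Python) =====
-- def similarStrings(n, queries):
--     # Count, per query, the windows of n whose pairwise-equality pattern matches
--     # the query window, by direct pairwise comparison (no bitmask precomputation).
--     out = []
--     L = len(n)
--     for s, e in queries:
--         m = e - s + 1
--         if m > 1:
--             q = n[s - 1:e]
--             cnt = 0
--             for st in range(L - m + 1):
--                 w = n[st:st + m]
--                 if all((w[i] == w[j]) == (q[i] == q[j])
--                        for i in range(m) for j in range(i + 1, m)):
--                     cnt += 1
--             out.append(cnt)
--         else:
--             out.append(L)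
--     return out
-- ===== Notes on version B (the rewrite author's own statement) =====
-- stated objective: simpler
-- what changed: B drops A's whole-string bitmask precomputation, submask extraction and progressive candidate filtering, and instead counts windows by directly comparing each window's pairwise character-equality pattern with the query window's.
-- outside the precondition, e.g. on similarStrings('ab', [(0, 1)]): A returns [1], B raises IndexError
import Mathlib
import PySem

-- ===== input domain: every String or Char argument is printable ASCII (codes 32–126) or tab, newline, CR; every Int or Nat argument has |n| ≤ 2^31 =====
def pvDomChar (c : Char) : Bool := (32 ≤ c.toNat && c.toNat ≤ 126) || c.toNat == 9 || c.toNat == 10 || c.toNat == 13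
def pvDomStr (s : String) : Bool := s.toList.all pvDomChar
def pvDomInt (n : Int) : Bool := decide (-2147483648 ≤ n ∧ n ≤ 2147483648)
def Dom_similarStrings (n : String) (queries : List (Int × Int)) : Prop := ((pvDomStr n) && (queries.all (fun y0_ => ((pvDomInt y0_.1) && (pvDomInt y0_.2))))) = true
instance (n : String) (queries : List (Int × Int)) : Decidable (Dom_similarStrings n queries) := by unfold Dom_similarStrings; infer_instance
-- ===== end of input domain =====

-- B replaces A's bitmask precomputation + progressive candidate filtering by a direct
-- per-window pairwise-equality comparison (objective: simpler; no speed claim).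

-- ===== PORT A =====

-- extract_map(subst); strings are handled on the List Char side (PySem convention)
def extractMap (subst : List Char) : List Int :=
  let len_ : Int := (subst.length : Int)
  (PySem.List.pyRange 0 (len_ - 1) 1).foldl
    (fun pairs s =>
      let r := (PySem.List.pyRange (s + 1) len_ 1).foldl
        (fun (st : Int × Int) e =>
          (if PySem.List.pyGet? subst s = PySem.List.pyGet? subst e
             then st.1 + (1 <<< st.2.toNat) else st.1,
           st.2 + 1))
        (0, 0)
      pairs ++ [r.1])
    []

-- extract_submap(map_, s, e); 'mask = 2**len_ - 1' is only a meaningful int when len_ ≥ 0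
-- (Python produces a float for len_ < 0, but then the loop is empty and mask is never used:
-- the 'if 0 ≤ len_' guard only makes the same computation total).
-- map_[s_] is pyGetD (in range on all inputs admitted by Pre_; pyGet? = none is excluded there).
def extractSubmap (map_ : List Int) (s e : Int) : List Int :=
  let len_ : Int := e - s - 1
  let mask : Int := if 0 ≤ len_ then 2 ^ len_.toNat - 1 else 0
  ((PySem.List.pyRange s (e - 1) 1).foldl
    (fun (st : List Int × Int) s_ =>
      (st.1 ++ [PySem.Int.band (PySem.List.pyGetD map_ s_ 0) st.2], st.2 >>> (1 : Nat)))
    ([], mask)).1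

def similarStrings (n : String) (queries : List (Int × Int)) : List Int :=
  let s_map := extractMap n.toList
  let s_len : Int := PySem.Str.len n
  queries.foldl
    (fun out q =>
      let s := q.1
      let e := q.2
      let ss_map := extractSubmap s_map (s - 1) e
      let ss_len := e - s + 1
      let sss_len :=
        if ss_len > 1 then
          let candidates := PySem.List.pyRange 0 (s_len - ss_len + 1) 1
          let mask : Int := 2 ^ (ss_len - 1).toNat - 1
          let r := ss_map.foldl
            (fun (st : List Int × Int) s_ =>
              ((st.1.filter (fun cand =>
                   decide (PySem.Int.band (PySem.List.pyGetD s_map cand 0) st.2 = s_))).map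
                 (fun cand => cand + 1),
               st.2 >>> (1 : Nat)))
            (candidates, mask)
          (r.1.length : Int)
        else s_len
      out ++ [sss_len])
    []

-- ===== PORT B =====
def similarStrings_alt (n : String) (queries : List (Int × Int)) : List Int :=
  let nl := n.toList
  let L : Int := PySem.Str.len n
  queries.foldl
    (fun out q =>
      let s := q.1
      let e := q.2
      let m := e - s + 1
      let v :=
        if m > 1 then
          let qw := PySem.List.slice nl (some (s - 1)) (some e)
          (PySem.List.pyRange 0 (L - m + 1) 1).foldl
            (fun cnt st =>
              let w := PySem.List.slice nl (some st) (some (st + m))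
              if (PySem.List.pyRange 0 m 1).all (fun i =>
                   (PySem.List.pyRange (i + 1) m 1).all (fun j =>
                     decide (PySem.List.pyGet? w i = PySem.List.pyGet? w j) ==
                     decide (PySem.List.pyGet? qw i = PySem.List.pyGet? qw j)))
              then cnt + 1 else cnt)
            0
        else L
      out ++ [v])
    []

-- ===== PRECONDITION & SPEC =====
-- Pre_ excludes exactly the queries with s < e whose bounds leave the string: there A
-- either raises IndexError (e > len(n)) or reads map_ through Python's negative-index
-- wraparound (s ≤ 0), an accident of indexing outside the 1-based domain.
def Pre_similarStrings (n : String) (queries : List (Int × Int)) : Prop :=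
  ∀ q ∈ queries, q.1 < q.2 → 1 ≤ q.1 ∧ q.2 ≤ (n.toList.length : Int)

instance (n : String) (queries : List (Int × Int)) : Decidable (Pre_similarStrings n queries) := by
  unfold Pre_similarStrings; infer_instance

def pvWitness_similarStrings : String × (List (Int × Int)) := ("abab", [(2, 4), (1, 1), (1, 4), (4, 2)])

def Spec_similarStrings (n : String) (queries : List (Int × Int)) (out : List Int) : Prop := out = similarStrings_alt n queries
instance (n : String) (queries : List (Int × Int)) (out : List Int) : Decidable (Spec_similarStrings n queries out) := by unfold Spec_similarStrings; infer_instance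

-- ===== CLAIM (what is proved, stated in full; the proofs are below) =====
def Claim_equal_similarStrings : Prop := ∀ (n : String) (queries : List (Int × Int)), Dom_similarStrings n queries → Pre_similarStrings n queries → Spec_similarStrings n queries (similarStrings n queries)

-- ===== LEMMAS AND PROOFS =====

-- little-endian binary value of a bit list: what A's inner loop accumulates
def encN : List Bool → Nat
  | [] => 0
  | b :: bs => (if b then 1 else 0) + 2 * encN bs

-- equality bits of position p against the later positions: bit k says cs[p] == cs[p+1+k]
def eqb (cs : List Char) (p : Nat) : List Bool :=
  (List.range (cs.length - 1 - p)).map (fun k => decide (cs[p]? = cs[p + 1 + k]?))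

-- does window at b agree with the query window at q0 on all equality bits of offset j?
def PAb (cs : List Char) (q0 m b j : Nat) : Bool :=
  (eqb cs (b + j)).take (m - 1 - j) == (eqb cs (q0 + j)).take (m - 1 - j)

-- the common value both programs compute for a query window [q0, q0+m), m ≥ 2
def simCount (cs : List Char) (q0 m : Nat) : Nat :=
  (List.range (cs.length - m + 1)).countP (fun b => decide (∀ j, j < m - 1 → PAb cs q0 m b j = true))

theorem eqb_length (cs : List Char) (p : Nat) : (eqb cs p).length = cs.length - 1 - p := by
  simp [eqb]

theorem encN_cons_true (bs : List Bool) : encN (true :: bs) = 1 + 2 * encN bs := by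
  simp [encN]

theorem encN_cons_false (bs : List Bool) : encN (false :: bs) = 2 * encN bs := by
  simp [encN]

theorem encN_mod (bs : List Bool) (t : Nat) : encN bs % 2 ^ t = encN (bs.take t) := by
  induction bs generalizing t with
  | nil => simp [encN]
  | cons b bs ih =>
    cases t with
    | zero => simp [encN, Nat.mod_one]
    | succ t =>
      have hp : (2 : Nat) ^ (t + 1) = 2 * 2 ^ t := by ring
      have hx := Nat.div_add_mod (encN bs) (2 ^ t)
      have hlt : encN bs % 2 ^ t < 2 ^ t := Nat.mod_lt _ (Nat.two_pow_pos t)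
      have h1 : (if b then 1 else 0) + 2 * encN bs
          = ((if b then 1 else 0) + 2 * (encN bs % 2 ^ t)) + (encN bs / 2 ^ t) * 2 ^ (t + 1) := by
        conv_lhs => rw [← hx]
        rw [hp]; ring
      have key : encN (b :: bs) % 2 ^ (t + 1) = (if b then 1 else 0) + 2 * (encN bs % 2 ^ t) := by
        show ((if b then 1 else 0) + 2 * encN bs) % 2 ^ (t + 1) = _
        rw [h1, Nat.add_mul_mod_self_right, Nat.mod_eq_of_lt]
        split <;> omega
      rw [key, List.take_succ_cons]
      show _ = (if b then 1 else 0) + 2 * encN (bs.take t)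
      rw [ih]

theorem encN_inj (bs cs : List Bool) (hl : bs.length = cs.length) (h : encN bs = encN cs) :
    bs = cs := by
  induction bs generalizing cs with
  | nil => cases cs with | nil => rfl | cons c cs => simp at hl
  | cons b bs ih =>
    cases cs with
    | nil => simp at hl
    | cons c cs' =>
      have hbc : (if b then 1 else 0) + 2 * encN bs = (if c then 1 else 0) + 2 * encN cs' := h
      have h2 : b = c := by cases b <;> cases c <;> simp at hbc ⊢ <;> omega
      subst h2
      have h3 : encN bs = encN cs' := by cases b <;> simp at hbc <;> omega
      rw [ih cs' (by simpa using hl) h3]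

theorem band_mask (a t : Nat) :
    PySem.Int.band ((a : Nat) : Int) ((2 : Int) ^ t - 1) = ((a % 2 ^ t : Nat) : Int) := by
  have h1 : (1 : Nat) ≤ 2 ^ t := Nat.one_le_two_pow
  have h2 : ((2 : Int) ^ t - 1) = ((2 ^ t - 1 : Nat) : Int) := by push_cast [h1]; ring
  rw [h2, PySem.Int.band_natCast, Nat.and_two_pow_sub_one_eq_mod]

theorem mask_shift (t : Nat) : ((2 : Int) ^ (t + 1) - 1) >>> (1 : Nat) = 2 ^ t - 1 := by
  have h : ((2 : Int) ^ (t + 1) - 1) / 2 = 2 ^ t - 1 := by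
    have hp : (2 : Int) ^ (t + 1) = 2 * 2 ^ t := by ring
    omega
  simpa [Int.shiftRight_eq_div_pow] using h

theorem innerA (cs : List Char) (p : Nat) (t : Nat) (a : Int) :
    ((PySem.List.pyRange ((p : Int) + 1 + (t : Int)) ((cs.length : Int)) 1).foldl
      (fun (st : Int × Int) e =>
        (if cs[p]? = PySem.List.pyGet? cs e
           then st.1 + (1 <<< st.2.toNat) else st.1,
         st.2 + 1))
      (a, (t : Int))).1 = a + 2 ^ t * ((encN ((eqb cs p).drop t) : Nat) : Int) := by
  have H : ∀ (k t : Nat) (a : Int), cs.length ≤ p + 1 + t + k →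
      ((PySem.List.pyRange ((p : Int) + 1 + (t : Int)) ((cs.length : Int)) 1).foldl
        (fun (st : Int × Int) e =>
          (if cs[p]? = PySem.List.pyGet? cs e
             then st.1 + (1 <<< st.2.toNat) else st.1,
           st.2 + 1))
        (a, (t : Int))).1 = a + 2 ^ t * ((encN ((eqb cs p).drop t) : Nat) : Int) := by
    intro k
    induction k with
    | zero =>
      intro t a hk
      rw [PySem.List.pyRange_one_eq_nil (by omega)]
      rw [List.drop_eq_nil_of_le (by rw [eqb_length]; omega)]
      simp [encN]
    | succ k ih =>
      intro t a hk
      by_cases h : p + 1 + t < cs.length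
      · rw [PySem.List.pyRange_one_cons (by omega)]
        simp only [List.foldl_cons]
        have he : ((p : Int) + 1 + (t : Int)) = ((p + 1 + t : Nat) : Int) := by push_cast; ring
        rw [he]
        simp only [PySem.List.pyGet?_natCast, Int.toNat_natCast]
        rw [show ((p + 1 + t : Nat) : Int) + 1 = (p : Int) + 1 + ((t + 1 : Nat) : Int) from by
              push_cast; ring,
            show ((t : Nat) : Int) + 1 = ((t + 1 : Nat) : Int) from by push_cast; ring]
        rw [ih (t + 1) _ (by omega)]
        have hlt : t < (eqb cs p).length := by rw [eqb_length]; omega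
        rw [List.drop_eq_getElem_cons hlt]
        have hget : (eqb cs p)[t]'hlt = decide (cs[p]? = cs[p + 1 + t]?) := by
          simp [eqb]
        rw [hget]
        by_cases hc : cs[p]? = cs[p + 1 + t]?
        · rw [if_pos hc, decide_eq_true hc, encN_cons_true]
          push_cast [Nat.shiftLeft_eq]
          ring
        · rw [if_neg hc, decide_eq_false hc, encN_cons_false]
          push_cast
          ring
      · rw [PySem.List.pyRange_one_eq_nil (by omega)]
        rw [List.drop_eq_nil_of_le (by rw [eqb_length]; omega)]
        simp [encN]
  exact H cs.length t a (by omega)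

theorem extractMap_eq (cs : List Char) :
    extractMap cs = (List.range (cs.length - 1)).map (fun p => ((encN (eqb cs p) : Nat) : Int)) := by
  simp only [extractMap]
  rw [PySem.List.foldl_append_singleton_eq_map
        (f := fun s => ((PySem.List.pyRange (s + 1) ((cs.length : Nat) : Int) 1).foldl
          (fun (st : Int × Int) e =>
            (if PySem.List.pyGet? cs s = PySem.List.pyGet? cs e
               then st.1 + (1 <<< st.2.toNat) else st.1,
             st.2 + 1)) (0, 0)).1)]
  rw [List.nil_append]
  cases hL : cs.length with
  | zero =>
    rw [PySem.List.pyRange_one_eq_nil (by omega)]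
    simp
  | succ nn =>
    rw [show (((nn + 1 : Nat) : Int) - 1) = ((nn : Nat) : Int) from by push_cast; ring]
    rw [PySem.List.pyRange_zero_natCast, List.map_map]
    rw [show nn + 1 - 1 = nn from rfl]
    apply List.map_congr_left
    intro p hp
    have h0 := innerA cs p 0 0
    rw [hL] at h0
    simpa using h0

theorem submapA_fold (cs : List Char) (q0 m : Nat) (he : q0 + m ≤ cs.length) :
    ∀ (d t : Nat) (acc : List Int), m - 1 - t ≤ d →
      ((PySem.List.pyRange ((q0 + t : Nat) : Int) ((q0 + (m - 1) : Nat) : Int) 1).foldl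
        (fun (st : List Int × Int) s_ =>
          (st.1 ++ [PySem.Int.band (PySem.List.pyGetD (extractMap cs) s_ 0) st.2],
           st.2 >>> (1 : Nat)))
        (acc, (2 : Int) ^ (m - 1 - t) - 1)).1
      = acc ++ (List.range (m - 1 - t)).map
          (fun i => ((encN ((eqb cs (q0 + t + i)).take (m - 1 - t - i)) : Nat) : Int)) := by
  intro d
  induction d with
  | zero =>
    intro t acc hd
    rw [PySem.List.pyRange_one_eq_nil (by omega)]
    simp [show m - 1 - t = 0 from by omega]
  | succ d ih =>
    intro t acc hd
    by_cases h : t < m - 1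
    · have hk1 : m - 1 - t = (m - 1 - (t + 1)) + 1 := by omega
      rw [PySem.List.pyRange_one_cons (by omega)]
      simp only [List.foldl_cons]
      have hval : PySem.Int.band (PySem.List.pyGetD (extractMap cs) ((q0 + t : Nat) : Int) 0)
            ((2 : Int) ^ (m - 1 - t) - 1)
          = ((encN ((eqb cs (q0 + t)).take (m - 1 - t)) : Nat) : Int) := by
        rw [extractMap_eq, PySem.List.pyGetD_natCast,
            PySem.List.getD_map_range _ (cs.length - 1) (q0 + t) 0 (by omega),
            band_mask, encN_mod]
      rw [hval]
      rw [show ((q0 + t : Nat) : Int) + 1 = ((q0 + (t + 1) : Nat) : Int) from by push_cast; ring]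
      rw [show ((2 : Int) ^ (m - 1 - t) - 1) >>> (1 : Nat) = 2 ^ (m - 1 - (t + 1)) - 1 from by
            rw [hk1]; exact mask_shift _]
      rw [ih (t + 1) _ (by omega)]
      rw [List.append_assoc]
      congr 1
      rw [hk1, List.range_succ_eq_map, List.map_cons, List.map_map, List.singleton_append]
      congr 1
      apply List.map_congr_left
      intro i hi
      simp only [Function.comp_apply, Nat.succ_eq_add_one]
      rw [show q0 + t + (i + 1) = q0 + (t + 1) + i from by omega,
          show m - 1 - (t + 1) + 1 - (i + 1) = m - 1 - (t + 1) - i from by omega]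
    · rw [PySem.List.pyRange_one_eq_nil (by omega)]
      simp [show m - 1 - t = 0 from by omega]

theorem submapA (cs : List Char) (q0 m : Nat) (hm : 2 ≤ m) (he : q0 + m ≤ cs.length) :
    extractSubmap (extractMap cs) ((q0 : Nat) : Int) ((q0 + m : Nat) : Int)
      = (List.range (m - 1)).map
          (fun i => ((encN ((eqb cs (q0 + i)).take (m - 1 - i)) : Nat) : Int)) := by
  simp only [extractSubmap]
  rw [show ((q0 + m : Nat) : Int) - (q0 : Nat) - 1 = ((m - 1 : Nat) : Int) from by push_cast; omega]
  rw [if_pos (by positivity)]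
  rw [show ((q0 + m : Nat) : Int) - 1 = ((q0 + (m - 1) : Nat) : Int) from by push_cast; omega]
  have hf := submapA_fold cs q0 m he (m - 1) 0 [] (by omega)
  simpa using hf

theorem candA_fold (cs : List Char) (q0 m N : Nat) (hm : 2 ≤ m) (hq : q0 + m ≤ cs.length)
    (hN : N + m = cs.length + 1) :
    ∀ (d t : Nat), m - 1 - t ≤ d → t ≤ m - 1 →
      ((List.range' t (m - 1 - t)).foldl
        (fun (st : List Int × Int) i =>
          ((st.1.filter (fun cand =>
              decide (PySem.Int.band (PySem.List.pyGetD (extractMap cs) cand 0) st.2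
                = ((encN ((eqb cs (q0 + i)).take (m - 1 - i)) : Nat) : Int)))).map
             (fun cand => cand + 1),
           st.2 >>> (1 : Nat)))
        (((List.range N).filter (fun b => decide (∀ j, j < t → PAb cs q0 m b j = true))).map
            (fun b => ((b : Nat) : Int) + (t : Int)),
         (2 : Int) ^ (m - 1 - t) - 1)).1
      = ((List.range N).filter (fun b => decide (∀ j, j < m - 1 → PAb cs q0 m b j = true))).map
          (fun b => ((b : Nat) : Int) + ((m - 1 : Nat) : Int)) := by
  intro d
  induction d with
  | zero =>
    intro t hd ht
    have htm : t = m - 1 := by omega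
    subst htm
    rw [show m - 1 - (m - 1) = 0 from by omega]
    simp
  | succ d ih =>
    intro t hd ht
    by_cases h : t < m - 1
    · have hk1 : m - 1 - t = (m - 1 - (t + 1)) + 1 := by omega
      rw [show List.range' t (m - 1 - t) = t :: List.range' (t + 1) (m - 1 - (t + 1)) from by
            rw [hk1, List.range'_succ]]
      simp only [List.foldl_cons]
      rw [List.filter_map, List.filter_filter, List.map_map]
      have hstep : ∀ b ∈ List.range N,
          ((fun a =>
            ((fun cand =>
                decide (PySem.Int.band (PySem.List.pyGetD (extractMap cs) cand 0)
                    ((2 : Int) ^ (m - 1 - t) - 1)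
                  = ((encN ((eqb cs (q0 + t)).take (m - 1 - t)) : Nat) : Int))) ∘
               (fun b : Nat => ((b : Nat) : Int) + (t : Int))) a
              && decide (∀ j, j < t → PAb cs q0 m a j = true)) b)
          = decide (∀ j, j < t + 1 → PAb cs q0 m b j = true) := by
        intro b hb
        have hbN : b < N := List.mem_range.mp hb
        simp only [Function.comp_apply]
        have hcast : ((b : Nat) : Int) + (t : Int) = ((b + t : Nat) : Int) := by push_cast; ring
        rw [hcast, extractMap_eq, PySem.List.pyGetD_natCast,
            PySem.List.getD_map_range _ (cs.length - 1) (b + t) 0 (by omega),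
            band_mask, encN_mod]
        have hlen1 : ((eqb cs (b + t)).take (m - 1 - t)).length = m - 1 - t := by
          rw [List.length_take, eqb_length]; omega
        have hlen2 : ((eqb cs (q0 + t)).take (m - 1 - t)).length = m - 1 - t := by
          rw [List.length_take, eqb_length]; omega
        have hdec : (decide (((encN ((eqb cs (b + t)).take (m - 1 - t)) : Nat) : Int)
              = ((encN ((eqb cs (q0 + t)).take (m - 1 - t)) : Nat) : Int)))
            = PAb cs q0 m b t := by
          rcases hPA : PAb cs q0 m b t with _ | _
          · apply decide_eq_false
            intro hc
            have heq : (eqb cs (b + t)).take (m - 1 - t) = (eqb cs (q0 + t)).take (m - 1 - t) :=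
              encN_inj _ _ (hlen1.trans hlen2.symm) (by exact_mod_cast hc)
            rw [PAb, heq, beq_self_eq_true] at hPA
            exact absurd hPA (by simp)
          · apply decide_eq_true
            have heq : (eqb cs (b + t)).take (m - 1 - t) = (eqb cs (q0 + t)).take (m - 1 - t) :=
              beq_iff_eq.mp hPA
            rw [heq]
        rw [hdec]
        rw [Bool.eq_iff_iff]
        simp only [Bool.and_eq_true, decide_eq_true_eq]
        constructor
        · rintro ⟨hPAt, h1⟩ j hj
          rcases Nat.lt_succ_iff_lt_or_eq.mp hj with h' | h'
          · exact h1 j h'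
          · subst h'
            exact hPAt
        · intro hf
          exact ⟨hf t (by omega), fun j hj => hf j (by omega)⟩
      rw [List.filter_congr hstep]
      rw [show ((2 : Int) ^ (m - 1 - t) - 1) >>> (1 : Nat) = 2 ^ (m - 1 - (t + 1)) - 1 from by
            rw [hk1]; exact mask_shift _]
      have hmap : (List.map ((fun cand => cand + 1) ∘ fun b : Nat => ((b : Nat) : Int) + (t : Int))
            ((List.range N).filter (fun b => decide (∀ j, j < t + 1 → PAb cs q0 m b j = true))))
          = (List.map (fun b : Nat => ((b : Nat) : Int) + ((t + 1 : Nat) : Int))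
            ((List.range N).filter (fun b => decide (∀ j, j < t + 1 → PAb cs q0 m b j = true)))) := by
        apply List.map_congr_left
        intro b hb
        simp only [Function.comp_apply]
        push_cast; ring
      rw [hmap]
      exact ih (t + 1) (by omega) (by omega)
    · have htm : t = m - 1 := by omega
      subst htm
      rw [show m - 1 - (m - 1) = 0 from by omega]
      simp

theorem pred_eq (cs : List Char) (q0 m b : Nat) (hm : 2 ≤ m) (hq : q0 + m ≤ cs.length)
    (hb : b + m ≤ cs.length) :
    ((PySem.List.pyRange 0 ((m : Nat) : Int) 1).all (fun i =>
      (PySem.List.pyRange (i + 1) ((m : Nat) : Int) 1).all (fun j =>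
        (decide (PySem.List.pyGet? ((cs.drop b).take m) i = PySem.List.pyGet? ((cs.drop b).take m) j) ==
         decide (PySem.List.pyGet? ((cs.drop q0).take m) i = PySem.List.pyGet? ((cs.drop q0).take m) j)))))
    = decide (∀ j, j < m - 1 → PAb cs q0 m b j = true) := by
  have hwin : ∀ (p i : Nat), i < m → PySem.List.pyGet? ((cs.drop p).take m) ((i : Nat) : Int) = cs[p + i]? := by
    intro p i hi
    rw [PySem.List.pyGet?_natCast, List.getElem?_take, if_pos hi, List.getElem?_drop]
  have htk : ∀ (p k : Nat), p + m ≤ cs.length → ∀ j, j < m - 1 → k < m - 1 - j →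
      ((eqb cs (p + j)).take (m - 1 - j))[k]? = some (decide (cs[p + j]? = cs[p + j + 1 + k]?)) := by
    intro p k hp j hj hk
    rw [List.getElem?_take, if_pos hk]
    have hkr : k < cs.length - 1 - (p + j) := by omega
    simp [eqb, hkr]
  rw [Bool.eq_iff_iff]
  simp only [List.all_eq_true, PySem.List.mem_pyRange_one, decide_eq_true_eq, beq_iff_eq,
    and_imp, decide_eq_decide]
  constructor
  · intro h j hj
    rw [PAb, beq_iff_eq]
    apply List.ext_getElem?
    intro k
    by_cases hk : k < m - 1 - j
    · rw [htk b k hb j hj hk, htk q0 k hq j hj hk]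
      have hinst := h ((j : Nat) : Int) (by positivity) (by exact_mod_cast (by omega : j < m))
        (((j + 1 + k : Nat) : Int)) (by push_cast; omega) (by exact_mod_cast (by omega : j + 1 + k < m))
      rw [hwin b j (by omega), hwin b (j + 1 + k) (by omega),
          hwin q0 j (by omega), hwin q0 (j + 1 + k) (by omega)] at hinst
      rw [show b + (j + 1 + k) = b + j + 1 + k from by omega,
          show q0 + (j + 1 + k) = q0 + j + 1 + k from by omega] at hinst
      exact congrArg some (decide_eq_decide.mpr hinst)
    · have hl1 : ((eqb cs (b + j)).take (m - 1 - j)).length ≤ k := by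
        rw [List.length_take]; omega
      have hl2 : ((eqb cs (q0 + j)).take (m - 1 - j)).length ≤ k := by
        rw [List.length_take]; omega
      rw [List.getElem?_eq_none hl1, List.getElem?_eq_none hl2]
  · intro h i hi0 him j hij hjm
    obtain ⟨iN, rfl⟩ : ∃ iN : Nat, i = (iN : Int) := ⟨i.toNat, by omega⟩
    obtain ⟨jN, rfl⟩ : ∃ jN : Nat, j = (jN : Int) := ⟨j.toNat, by omega⟩
    have hiN : iN < jN := by exact_mod_cast (by omega : (iN : Int) < jN)
    have hjN : jN < m := by exact_mod_cast hjm
    have hP := h iN (by omega)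
    rw [PAb, beq_iff_eq] at hP
    have hcomp := congrArg (fun l => l[jN - iN - 1]?) hP
    simp only at hcomp
    rw [htk b (jN - iN - 1) hb iN (by omega) (by omega),
        htk q0 (jN - iN - 1) hq iN (by omega) (by omega)] at hcomp
    rw [show b + iN + 1 + (jN - iN - 1) = b + jN from by omega,
        show q0 + iN + 1 + (jN - iN - 1) = q0 + jN from by omega] at hcomp
    rw [hwin b iN (by omega), hwin b jN (by omega), hwin q0 iN (by omega), hwin q0 jN (by omega)]
    exact decide_eq_decide.mp (Option.some.inj hcomp)

theorem A_branch (cs : List Char) (q0 m : Nat) (hm : 2 ≤ m) (hq : q0 + m ≤ cs.length) :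
    ((((extractSubmap (extractMap cs) ((q0 : Nat) : Int) ((q0 + m : Nat) : Int)).foldl
        (fun (st : List Int × Int) s_ =>
          ((st.1.filter (fun cand =>
              decide (PySem.Int.band (PySem.List.pyGetD (extractMap cs) cand 0) st.2 = s_))).map
             (fun cand => cand + 1),
           st.2 >>> (1 : Nat)))
        (PySem.List.pyRange 0 ((cs.length : Int) - ((m : Nat) : Int) + 1) 1,
         2 ^ (((m : Nat) : Int) - 1).toNat - 1)).1.length : Nat) : Int)
      = ((simCount cs q0 m : Nat) : Int) := by
  rw [submapA cs q0 m hm hq, List.foldl_map]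
  rw [show ((cs.length : Int) - ((m : Nat) : Int) + 1) = ((cs.length - m + 1 : Nat) : Int) from by
        push_cast; omega]
  rw [show PySem.List.pyRange 0 ((cs.length - m + 1 : Nat) : Int) 1
        = (List.range (cs.length - m + 1)).map (fun k => ((k : Nat) : Int)) from
      PySem.List.pyRange_zero_natCast _]
  rw [show (((m : Nat) : Int) - 1).toNat = m - 1 from by omega]
  have hcf := candA_fold cs q0 m (cs.length - m + 1) hm hq (by omega) (m - 1) 0 (by omega) (by omega)
  simp only [Nat.sub_zero, Nat.cast_zero, add_zero, Nat.not_lt_zero, false_implies, implies_true,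
    decide_true, List.filter_true, ← List.range_eq_range'] at hcf
  rw [hcf]
  rw [List.length_map, simCount, List.countP_eq_length_filter]

theorem B_branch (cs : List Char) (q0 m : Nat) (hm : 2 ≤ m) (hq : q0 + m ≤ cs.length) :
    ((PySem.List.pyRange 0 ((cs.length : Int) - ((m : Nat) : Int) + 1) 1).foldl
      (fun cnt st =>
        if (PySem.List.pyRange 0 ((m : Nat) : Int) 1).all (fun i =>
             (PySem.List.pyRange (i + 1) ((m : Nat) : Int) 1).all (fun j =>
               decide (PySem.List.pyGet? (PySem.List.slice cs (some st) (some (st + ((m : Nat) : Int)))) i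
                   = PySem.List.pyGet? (PySem.List.slice cs (some st) (some (st + ((m : Nat) : Int)))) j) ==
               decide (PySem.List.pyGet? (PySem.List.slice cs (some ((q0 : Nat) : Int)) (some (((q0 + m : Nat) : Int)))) i
                   = PySem.List.pyGet? (PySem.List.slice cs (some ((q0 : Nat) : Int)) (some (((q0 + m : Nat) : Int)))) j)))
        then cnt + 1 else cnt)
      0) = ((simCount cs q0 m : Nat) : Int) := by
  rw [show ((cs.length : Int) - ((m : Nat) : Int) + 1) = ((cs.length - m + 1 : Nat) : Int) from by
        push_cast; omega]
  rw [show PySem.List.pyRange 0 ((cs.length - m + 1 : Nat) : Int) 1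
        = (List.range (cs.length - m + 1)).map (fun k => ((k : Nat) : Int)) from
      PySem.List.pyRange_zero_natCast _]
  rw [PySem.List.foldl_if_add_one, List.countP_map, zero_add]
  rw [simCount]
  congr 1
  apply List.countP_congr
  intro b hb
  have hbN : b < cs.length - m + 1 := List.mem_range.mp hb
  simp only [Function.comp_apply]
  rw [show ((q0 + m : Nat) : Int) = ((q0 : Nat) : Int) + ((m : Nat) : Int) from by push_cast; ring]
  rw [PySem.List.slice_natCast_add cs q0 m, PySem.List.slice_natCast_add cs b m]
  rw [pred_eq cs q0 m b hm hq (by omega)]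

-- ===== VERDICT (by name: the statement is the Claim_ definition above) =====
theorem similarStrings_spec : Claim_equal_similarStrings := by
  intro n queries _hdom hpre
  show similarStrings n queries = similarStrings_alt n queries
  simp only [similarStrings, similarStrings_alt]
  rw [PySem.List.foldl_append_singleton_eq_map, PySem.List.foldl_append_singleton_eq_map,
      List.nil_append, List.nil_append]
  apply List.map_congr_left
  intro q hq
  by_cases hgt : q.2 - q.1 + 1 > 1
  · rw [if_pos hgt, if_pos hgt]
    obtain ⟨hs, he⟩ := hpre q hq (by omega)
    obtain ⟨q0, hq0⟩ : ∃ q0 : Nat, q.1 - 1 = ((q0 : Nat) : Int) := ⟨(q.1 - 1).toNat, by omega⟩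
    obtain ⟨m, hm'⟩ : ∃ m : Nat, q.2 - q.1 + 1 = ((m : Nat) : Int) := ⟨(q.2 - q.1 + 1).toNat, by omega⟩
    have hm : 2 ≤ m := by omega
    have he2 : q.2 = ((q0 + m : Nat) : Int) := by push_cast; omega
    have hqm : q0 + m ≤ n.toList.length := by omega
    rw [PySem.Str.len_eq, hm', hq0, he2]
    rw [A_branch n.toList q0 m hm hqm, B_branch n.toList q0 m hm hqm]
  · rw [if_neg hgt, if_neg hgt]
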